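-- pv_equiv track=rewrite | github.com/AbhayAjay2803/Vetenary-Project1 | utils/helpers.py | get_diagnostic_recommendations
-- ===== SOURCE A (Python) =====
-- def get_diagnostic_recommendations(symptoms, animal_type):
--     """Get specific diagnostic recommendations based on symptoms"""
--     diagnostics = []
--
--     # Base diagnostics for all cases
--     base_diagnostics = [
--         "Complete physical examination with vital signs",
--         "Comprehensive blood work (CBC, biochemistry profile)",
--         "Urinalysis for systemic assessment"
--     ]
--
--     diagnostics.extend(base_diagnostics)
--
--     # Symptom-specific diagnostics
--     if any(s in symptoms for s in ['vomiting', 'diarrhea', 'abdominal_pain', 'bloating']):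
--         diagnostics.extend([
--             "Fecal examination for parasites and pathogens",
--             "Abdominal radiographs and/or ultrasound",
--             "Pancreatic testing (canine/feline pancreatic lipase)"
--         ])
--
--     if any(s in symptoms for s in ['coughing', 'sneezing', 'nasal_discharge', 'rapid_breathing']):
--         diagnostics.extend([
--             "Thoracic radiographs",
--             "Respiratory PCR panel",
--             "Tracheal/bronchial wash for cytology and culture"
--         ])
--
--     if any(s in symptoms for s in ['seizures', 'tremors', 'unconsciousness', 'paralysis']):
--         diagnostics.extend([
--             "Neurological examination",
--             "Advanced imaging (MRI/CT) if indicated",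
--             "Cerebrospinal fluid analysis"
--         ])
--
--     if any(s in symptoms for s in ['skin_lesions', 'hair_loss', 'skin_rashes', 'itching']):
--         diagnostics.extend([
--             "Skin scrapings and cytology",
--             "Fungal culture",
--             "Allergy testing if indicated"
--         ])
--
--     if any(s in symptoms for s in ['lethargy', 'fever', 'weight_loss', 'weakness']):
--         diagnostics.extend([
--             "Infectious disease testing",
--             "Thyroid function testing",
--             "Additional organ-specific testing as indicated"
--         ])
--
--     return diagnostics
-- ===== SOURCE B (Python) =====
-- BASE_DIAGNOSTICS = [
--     "Complete physical examination with vital signs",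
--     "Comprehensive blood work (CBC, biochemistry profile)",
--     "Urinalysis for systemic assessment",
-- ]
--
-- # Inverted index: each trigger symptom maps to its category number.
-- CATEGORY_OF = {
--     'vomiting': 0, 'diarrhea': 0, 'abdominal_pain': 0, 'bloating': 0,
--     'coughing': 1, 'sneezing': 1, 'nasal_discharge': 1, 'rapid_breathing': 1,
--     'seizures': 2, 'tremors': 2, 'unconsciousness': 2, 'paralysis': 2,
--     'skin_lesions': 3, 'hair_loss': 3, 'skin_rashes': 3, 'itching': 3,
--     'lethargy': 4, 'fever': 4, 'weight_loss': 4, 'weakness': 4,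
-- }
--
-- EXTRA_DIAGNOSTICS = [
--     ["Fecal examination for parasites and pathogens",
--      "Abdominal radiographs and/or ultrasound",
--      "Pancreatic testing (canine/feline pancreatic lipase)"],
--     ["Thoracic radiographs",
--      "Respiratory PCR panel",
--      "Tracheal/bronchial wash for cytology and culture"],
--     ["Neurological examination",
--      "Advanced imaging (MRI/CT) if indicated",
--      "Cerebrospinal fluid analysis"],
--     ["Skin scrapings and cytology",
--      "Fungal culture",
--      "Allergy testing if indicated"],
--     ["Infectious disease testing",
--      "Thyroid function testing",
--      "Additional organ-specific testing as indicated"],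
-- ]
--
--
-- def get_diagnostic_recommendations(symptoms, animal_type):
--     """Single pass over the symptoms through an inverted symptom->category index,
--     collecting the set of triggered categories, then emit base + extras in order."""
--     triggered = set()
--     for s in symptoms:
--         c = CATEGORY_OF.get(s)
--         if c is not None:
--             triggered.add(c)
--     diagnostics = list(BASE_DIAGNOSTICS)
--     for i, extras in enumerate(EXTRA_DIAGNOSTICS):
--         if i in triggered:
--             diagnostics += extras
--     return diagnostics
-- ===== Notes on version B (the rewrite author's own statement) =====
-- stated objective: faster
-- what changed: Replaces the five any(keyword in symptoms) list scans by an inverted symptom->category dictionary: one pass over the symptoms collects the set of triggered categories, then base + the triggered categories' extras are emitted in order.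
import Mathlib
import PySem

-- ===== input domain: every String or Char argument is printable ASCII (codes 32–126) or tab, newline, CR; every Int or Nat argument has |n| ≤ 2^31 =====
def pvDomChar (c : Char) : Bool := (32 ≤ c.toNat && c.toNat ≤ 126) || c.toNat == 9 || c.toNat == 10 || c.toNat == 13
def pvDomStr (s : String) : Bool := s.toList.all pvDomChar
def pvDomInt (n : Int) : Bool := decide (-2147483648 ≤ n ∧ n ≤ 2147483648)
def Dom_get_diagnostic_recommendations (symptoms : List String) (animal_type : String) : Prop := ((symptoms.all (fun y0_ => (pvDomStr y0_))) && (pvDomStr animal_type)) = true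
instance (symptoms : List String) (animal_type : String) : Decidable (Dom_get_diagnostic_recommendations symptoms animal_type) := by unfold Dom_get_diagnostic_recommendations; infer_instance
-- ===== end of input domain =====

-- B replaces A's five any(keyword in symptoms) list scans by an inverted symptom->category
-- dictionary read in one pass over the symptoms collecting the set of triggered categories.

-- ===== PORT A =====
def get_diagnostic_recommendations (symptoms : List String) (animal_type : String) : List String :=
  let diagnostics : List String := []
  let base_diagnostics : List String :=
    [ "Complete physical examination with vital signs",
      "Comprehensive blood work (CBC, biochemistry profile)",
      "Urinalysis for systemic assessment" ]
  let diagnostics := diagnostics ++ base_diagnostics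
  let diagnostics :=
    if (["vomiting", "diarrhea", "abdominal_pain", "bloating"].any (fun s => symptoms.contains s)) then
      diagnostics ++
        [ "Fecal examination for parasites and pathogens",
          "Abdominal radiographs and/or ultrasound",
          "Pancreatic testing (canine/feline pancreatic lipase)" ]
    else diagnostics
  let diagnostics :=
    if (["coughing", "sneezing", "nasal_discharge", "rapid_breathing"].any (fun s => symptoms.contains s)) then
      diagnostics ++
        [ "Thoracic radiographs",
          "Respiratory PCR panel",
          "Tracheal/bronchial wash for cytology and culture" ]
    else diagnostics
  let diagnostics :=
    if (["seizures", "tremors", "unconsciousness", "paralysis"].any (fun s => symptoms.contains s)) then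
      diagnostics ++
        [ "Neurological examination",
          "Advanced imaging (MRI/CT) if indicated",
          "Cerebrospinal fluid analysis" ]
    else diagnostics
  let diagnostics :=
    if (["skin_lesions", "hair_loss", "skin_rashes", "itching"].any (fun s => symptoms.contains s)) then
      diagnostics ++
        [ "Skin scrapings and cytology",
          "Fungal culture",
          "Allergy testing if indicated" ]
    else diagnostics
  let diagnostics :=
    if (["lethargy", "fever", "weight_loss", "weakness"].any (fun s => symptoms.contains s)) then
      diagnostics ++
        [ "Infectious disease testing",
          "Thyroid function testing",
          "Additional organ-specific testing as indicated" ]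
    else diagnostics
  diagnostics

-- ===== PORT B =====
def pvBaseDiagnostics : List String :=
  [ "Complete physical examination with vital signs",
    "Comprehensive blood work (CBC, biochemistry profile)",
    "Urinalysis for systemic assessment" ]

-- inverted index: trigger symptom -> category number (Source B's CATEGORY_OF)
def pvCategoryOf : PySem.Dict String Int :=
  PySem.Dict.ofList
    [ ("vomiting", 0), ("diarrhea", 0), ("abdominal_pain", 0), ("bloating", 0),
      ("coughing", 1), ("sneezing", 1), ("nasal_discharge", 1), ("rapid_breathing", 1),
      ("seizures", 2), ("tremors", 2), ("unconsciousness", 2), ("paralysis", 2),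
      ("skin_lesions", 3), ("hair_loss", 3), ("skin_rashes", 3), ("itching", 3),
      ("lethargy", 4), ("fever", 4), ("weight_loss", 4), ("weakness", 4) ]

def pvExtraDiagnostics : List (List String) :=
  [ [ "Fecal examination for parasites and pathogens",
      "Abdominal radiographs and/or ultrasound",
      "Pancreatic testing (canine/feline pancreatic lipase)" ],
    [ "Thoracic radiographs",
      "Respiratory PCR panel",
      "Tracheal/bronchial wash for cytology and culture" ],
    [ "Neurological examination",
      "Advanced imaging (MRI/CT) if indicated",
      "Cerebrospinal fluid analysis" ],
    [ "Skin scrapings and cytology",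
      "Fungal culture",
      "Allergy testing if indicated" ],
    [ "Infectious disease testing",
      "Thyroid function testing",
      "Additional organ-specific testing as indicated" ] ]

-- the body of Source B's first loop: look the symptom up, add its category if present
def pvStep (t : PySem.Set Int) (s : String) : PySem.Set Int :=
  match pvCategoryOf.get? s with
  | some c => PySem.Set.add t c
  | none => t

def get_diagnostic_recommendations_alt (symptoms : List String) (animal_type : String) : List String :=
  let triggered : PySem.Set Int := symptoms.foldl pvStep PySem.Set.empty
  (PySem.List.enumerate pvExtraDiagnostics).foldl
    (fun diagnostics p =>
      if PySem.Set.contains triggered p.1 then diagnostics ++ p.2 else diagnostics)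
    pvBaseDiagnostics

-- ===== PRECONDITION & SPEC =====
def Spec_get_diagnostic_recommendations (symptoms : List String) (animal_type : String) (out : List String) : Prop := out = get_diagnostic_recommendations_alt symptoms animal_type
instance (symptoms : List String) (animal_type : String) (out : List String) : Decidable (Spec_get_diagnostic_recommendations symptoms animal_type out) := by unfold Spec_get_diagnostic_recommendations; infer_instance

-- ===== CLAIM (what is proved, stated in full; the proofs are below) =====
def Claim_equal_get_diagnostic_recommendations : Prop := ∀ (symptoms : List String) (animal_type : String), Dom_get_diagnostic_recommendations symptoms animal_type → Spec_get_diagnostic_recommendations symptoms animal_type (get_diagnostic_recommendations symptoms animal_type)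

-- ===== LEMMAS AND PROOFS =====

-- all twenty trigger keywords (proof helper)
def pvKeys : List String :=
  [ "vomiting", "diarrhea", "abdominal_pain", "bloating",
    "coughing", "sneezing", "nasal_discharge", "rapid_breathing",
    "seizures", "tremors", "unconsciousness", "paralysis",
    "skin_lesions", "hair_loss", "skin_rashes", "itching",
    "lethargy", "fever", "weight_loss", "weakness" ]

-- outside the key set the inverted index has no entry
lemma pv_get?_none (s : String) (hs : s ∉ pvKeys) : pvCategoryOf.get? s = none := by
  simp only [pvKeys, List.mem_cons, not_or] at hs
  obtain ⟨h1,h2,h3,h4,h5,h6,h7,h8,h9,h10,h11,h12,h13,h14,h15,h16,h17,h18,h19,h20⟩ := hs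
  have h : pvCategoryOf = PySem.Dict.mk
    [ ("vomiting", 0), ("diarrhea", 0), ("abdominal_pain", 0), ("bloating", 0),
      ("coughing", 1), ("sneezing", 1), ("nasal_discharge", 1), ("rapid_breathing", 1),
      ("seizures", 2), ("tremors", 2), ("unconsciousness", 2), ("paralysis", 2),
      ("skin_lesions", 3), ("hair_loss", 3), ("skin_rashes", 3), ("itching", 3),
      ("lethargy", 4), ("fever", 4), ("weight_loss", 4), ("weakness", 4) ] := by rfl
  rw [h]
  simp only [PySem.Dict.get?_mk_cons, beq_iff_eq]
  rw [if_neg (Ne.symm h1), if_neg (Ne.symm h2), if_neg (Ne.symm h3), if_neg (Ne.symm h4),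
      if_neg (Ne.symm h5), if_neg (Ne.symm h6), if_neg (Ne.symm h7), if_neg (Ne.symm h8),
      if_neg (Ne.symm h9), if_neg (Ne.symm h10), if_neg (Ne.symm h11), if_neg (Ne.symm h12),
      if_neg (Ne.symm h13), if_neg (Ne.symm h14), if_neg (Ne.symm h15), if_neg (Ne.symm h16),
      if_neg (Ne.symm h17), if_neg (Ne.symm h18), if_neg (Ne.symm h19), if_neg (Ne.symm h20.1)]
  simp [PySem.Dict.get?]

-- membership in the triggered set accumulated by Source B's first loop
lemma pv_trig_contains (symptoms : List String) (acc : PySem.Set Int) (i : Int) :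
    PySem.Set.contains (symptoms.foldl pvStep acc) i
      = (acc.contains i || symptoms.any (fun s => pvCategoryOf.get? s == some i)) := by
  induction symptoms generalizing acc with
  | nil => simp [PySem.Set.contains]
  | cons s rest ih =>
    rw [List.foldl_cons, List.any_cons]
    cases h : pvCategoryOf.get? s with
    | none =>
      have hst : pvStep acc s = acc := by simp [pvStep, h]
      rw [hst, ih]
      simp
    | some c =>
      have hst : pvStep acc s = PySem.Set.add acc c := by simp [pvStep, h]
      have hadd : (PySem.Set.add acc c).contains i = (acc.contains i || c == i) := by
        rw [Bool.eq_iff_iff]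
        simp only [PySem.Set.contains, Bool.or_eq_true, List.contains_iff_mem, beq_iff_eq,
          PySem.Set.mem_add]
        tauto
      rw [hst, ih, hadd]
      simp [Bool.or_assoc]

-- the index lookup agrees with each keyword group, pointwise
lemma pv_point0 (s : String) :
    (pvCategoryOf.get? s == some 0) = ["vomiting", "diarrhea", "abdominal_pain", "bloating"].contains s := by
  by_cases hs : s ∈ pvKeys
  · fin_cases hs <;> rfl
  · rw [pv_get?_none s hs]
    simp only [pvKeys, List.mem_cons, not_or] at hs
    simp [hs.1, hs.2.1, hs.2.2.1, hs.2.2.2.1]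

lemma pv_point1 (s : String) :
    (pvCategoryOf.get? s == some 1) = ["coughing", "sneezing", "nasal_discharge", "rapid_breathing"].contains s := by
  by_cases hs : s ∈ pvKeys
  · fin_cases hs <;> rfl
  · rw [pv_get?_none s hs]
    simp only [pvKeys, List.mem_cons, not_or] at hs
    simp [hs.2.2.2.2.1, hs.2.2.2.2.2.1, hs.2.2.2.2.2.2.1, hs.2.2.2.2.2.2.2.1]

lemma pv_point2 (s : String) :
    (pvCategoryOf.get? s == some 2) = ["seizures", "tremors", "unconsciousness", "paralysis"].contains s := by
  by_cases hs : s ∈ pvKeys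
  · fin_cases hs <;> rfl
  · rw [pv_get?_none s hs]
    simp only [pvKeys, List.mem_cons, not_or] at hs
    simp [hs.2.2.2.2.2.2.2.2.1, hs.2.2.2.2.2.2.2.2.2.1,
      hs.2.2.2.2.2.2.2.2.2.2.1, hs.2.2.2.2.2.2.2.2.2.2.2.1]

lemma pv_point3 (s : String) :
    (pvCategoryOf.get? s == some 3) = ["skin_lesions", "hair_loss", "skin_rashes", "itching"].contains s := by
  by_cases hs : s ∈ pvKeys
  · fin_cases hs <;> rfl
  · rw [pv_get?_none s hs]
    simp only [pvKeys, List.mem_cons, not_or] at hs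
    simp [hs.2.2.2.2.2.2.2.2.2.2.2.2.1, hs.2.2.2.2.2.2.2.2.2.2.2.2.2.1,
      hs.2.2.2.2.2.2.2.2.2.2.2.2.2.2.1, hs.2.2.2.2.2.2.2.2.2.2.2.2.2.2.2.1]

lemma pv_point4 (s : String) :
    (pvCategoryOf.get? s == some 4) = ["lethargy", "fever", "weight_loss", "weakness"].contains s := by
  by_cases hs : s ∈ pvKeys
  · fin_cases hs <;> rfl
  · rw [pv_get?_none s hs]
    simp only [pvKeys, List.mem_cons, not_or] at hs
    simp [hs.2.2.2.2.2.2.2.2.2.2.2.2.2.2.2.2.1, hs.2.2.2.2.2.2.2.2.2.2.2.2.2.2.2.2.2.1,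
      hs.2.2.2.2.2.2.2.2.2.2.2.2.2.2.2.2.2.2.1, hs.2.2.2.2.2.2.2.2.2.2.2.2.2.2.2.2.2.2.2.1]

-- category 0 fires iff one of its keywords is reported
lemma pv_trig0 (symptoms : List String) :
    ((0:Int) ∈ List.foldl pvStep ([] : PySem.Set Int) symptoms) ↔ ("vomiting" ∈ symptoms ∨ "diarrhea" ∈ symptoms ∨ "abdominal_pain" ∈ symptoms ∨ "bloating" ∈ symptoms) := by
  have h := pv_trig_contains symptoms ([] : PySem.Set Int) 0
  simp only [pv_point0] at h
  rw [← List.contains_iff_mem]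
  simp only [PySem.Set.contains] at h
  rw [h]
  simp only [List.contains_nil, Bool.false_or, List.any_eq_true,
    List.contains_iff_mem, List.mem_cons, List.not_mem_nil, or_false]
  constructor
  · rintro ⟨s, hs, (rfl|rfl|rfl|rfl)⟩ <;> tauto
  · rintro (h|h|h|h) <;> exact ⟨_, h, by tauto⟩

-- category 1 fires iff one of its keywords is reported
lemma pv_trig1 (symptoms : List String) :
    ((1:Int) ∈ List.foldl pvStep ([] : PySem.Set Int) symptoms) ↔ ("coughing" ∈ symptoms ∨ "sneezing" ∈ symptoms ∨ "nasal_discharge" ∈ symptoms ∨ "rapid_breathing" ∈ symptoms) := by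
  have h := pv_trig_contains symptoms ([] : PySem.Set Int) 1
  simp only [pv_point1] at h
  rw [← List.contains_iff_mem]
  simp only [PySem.Set.contains] at h
  rw [h]
  simp only [List.contains_nil, Bool.false_or, List.any_eq_true,
    List.contains_iff_mem, List.mem_cons, List.not_mem_nil, or_false]
  constructor
  · rintro ⟨s, hs, (rfl|rfl|rfl|rfl)⟩ <;> tauto
  · rintro (h|h|h|h) <;> exact ⟨_, h, by tauto⟩

-- category 2 fires iff one of its keywords is reported
lemma pv_trig2 (symptoms : List String) :
    ((2:Int) ∈ List.foldl pvStep ([] : PySem.Set Int) symptoms) ↔ ("seizures" ∈ symptoms ∨ "tremors" ∈ symptoms ∨ "unconsciousness" ∈ symptoms ∨ "paralysis" ∈ symptoms) := by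
  have h := pv_trig_contains symptoms ([] : PySem.Set Int) 2
  simp only [pv_point2] at h
  rw [← List.contains_iff_mem]
  simp only [PySem.Set.contains] at h
  rw [h]
  simp only [List.contains_nil, Bool.false_or, List.any_eq_true,
    List.contains_iff_mem, List.mem_cons, List.not_mem_nil, or_false]
  constructor
  · rintro ⟨s, hs, (rfl|rfl|rfl|rfl)⟩ <;> tauto
  · rintro (h|h|h|h) <;> exact ⟨_, h, by tauto⟩

-- category 3 fires iff one of its keywords is reported
lemma pv_trig3 (symptoms : List String) :
    ((3:Int) ∈ List.foldl pvStep ([] : PySem.Set Int) symptoms) ↔ ("skin_lesions" ∈ symptoms ∨ "hair_loss" ∈ symptoms ∨ "skin_rashes" ∈ symptoms ∨ "itching" ∈ symptoms) := by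
  have h := pv_trig_contains symptoms ([] : PySem.Set Int) 3
  simp only [pv_point3] at h
  rw [← List.contains_iff_mem]
  simp only [PySem.Set.contains] at h
  rw [h]
  simp only [List.contains_nil, Bool.false_or, List.any_eq_true,
    List.contains_iff_mem, List.mem_cons, List.not_mem_nil, or_false]
  constructor
  · rintro ⟨s, hs, (rfl|rfl|rfl|rfl)⟩ <;> tauto
  · rintro (h|h|h|h) <;> exact ⟨_, h, by tauto⟩

-- category 4 fires iff one of its keywords is reported
lemma pv_trig4 (symptoms : List String) :
    ((4:Int) ∈ List.foldl pvStep ([] : PySem.Set Int) symptoms) ↔ ("lethargy" ∈ symptoms ∨ "fever" ∈ symptoms ∨ "weight_loss" ∈ symptoms ∨ "weakness" ∈ symptoms) := by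
  have h := pv_trig_contains symptoms ([] : PySem.Set Int) 4
  simp only [pv_point4] at h
  rw [← List.contains_iff_mem]
  simp only [PySem.Set.contains] at h
  rw [h]
  simp only [List.contains_nil, Bool.false_or, List.any_eq_true,
    List.contains_iff_mem, List.mem_cons, List.not_mem_nil, or_false]
  constructor
  · rintro ⟨s, hs, (rfl|rfl|rfl|rfl)⟩ <;> tauto
  · rintro (h|h|h|h) <;> exact ⟨_, h, by tauto⟩

-- ===== VERDICT (by name: the statement is the Claim_ definition above) =====
theorem get_diagnostic_recommendations_spec : Claim_equal_get_diagnostic_recommendations := by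
  intro symptoms animal_type _
  unfold Spec_get_diagnostic_recommendations get_diagnostic_recommendations
    get_diagnostic_recommendations_alt pvExtraDiagnostics pvBaseDiagnostics
  simp only [PySem.List.enumerate_cons, PySem.List.enumerate_nil, List.foldl_cons, List.foldl_nil,
    List.nil_append]
  norm_num
  simp only [pv_trig0, pv_trig1, pv_trig2, pv_trig3, pv_trig4]
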